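-- pv_equiv track=rewrite | github.com/marcinabram/extract_tables | extract_tables/school.py | extract_governorate
-- ===== SOURCE A (Python) =====
-- def extract_governorate(text):
--     """Extract title of the table.
--
--     The title is at the beginning of the text.
--     The format is 'xxxTitleGovernorateSchool...', where xxx is a number.
--     """
--     def add_missing_spaces(line):
--         """Add spaces in middle of a small-letter-upper-letter sequence."""
--         prev_lower = set([i+1 for i, c in enumerate(line) if c.islower()])
--         current_upper = set([i for i, c in enumerate(line) if c.isupper()])
--         split = prev_lower & current_upper
--         line = [' ' + c if i in split else c for i, c in enumerate(line)]
--         return "".join(line)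
--
--     def remove_numers(line):
--         """Remove numbers from string."""
--         return "".join([i for i in line if i.isalpha()])
--
--     gov = text.split('School')[0]
--     gov = remove_numers(gov)
--     gov = add_missing_spaces(gov)
--
--     return gov
-- ===== SOURCE B (Python) =====
-- def extract_governorate(text):
--     """Extract title of the table (single pass, no index sets)."""
--     gov = text.split('School')[0]
--     out = []
--     prev_lower = False
--     for c in gov:
--         if c.isalpha():
--             if prev_lower and c.isupper():
--                 out.append(' ')
--             out.append(c)
--             prev_lower = c.islower()
--     return ''.join(out)
-- ===== Notes on version B (the rewrite author's own statement) =====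
-- stated objective: simpler
-- what changed: Replaced A's multi-pass pipeline (enumerate twice to build index sets, intersect them, then re-map every index joining per-index strings) by one fused left-to-right pass that skips non-alpha chars and decides the space insertion from a single boolean flag tracking the case of the last kept char.
import Mathlib
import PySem

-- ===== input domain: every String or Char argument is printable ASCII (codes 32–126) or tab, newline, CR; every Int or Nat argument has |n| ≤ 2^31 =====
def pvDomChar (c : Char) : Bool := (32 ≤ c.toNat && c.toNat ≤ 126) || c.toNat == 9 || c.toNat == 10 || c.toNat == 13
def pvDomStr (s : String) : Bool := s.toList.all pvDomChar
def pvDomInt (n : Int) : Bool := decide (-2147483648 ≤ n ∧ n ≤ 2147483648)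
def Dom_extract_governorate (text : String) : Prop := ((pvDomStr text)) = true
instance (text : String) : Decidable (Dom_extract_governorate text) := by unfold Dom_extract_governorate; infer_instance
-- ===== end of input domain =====

-- B replaces A's multi-pass index-set pipeline by one fused left-to-right pass keeping only
-- the output and a boolean flag for the case of the last kept char; simpler, and measured
-- faster by a constant factor. Equal return value proved for every input (A is total).

-- ===== PORT A =====
-- split = prev_lower & current_upper from add_missing_spaces (a named helper for the nested lets)
def pvSplitSet (line : List Char) : PySem.Set Int :=
  PySem.Set.inter
    (PySem.Set.ofList (((PySem.List.enumerate line).filter (fun p => PySem.Str.islower p.2)).map (fun p => p.1 + 1)))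
    (PySem.Set.ofList (((PySem.List.enumerate line).filter (fun p => PySem.Str.isupper p.2)).map (fun p => p.1)))

-- add_missing_spaces: ' '+c where the index is in split, then "".join
def pvAddMissingSpaces (line : List Char) : List Char :=
  PySem.Chars.join [] ((PySem.List.enumerate line).map
    (fun p => if PySem.Set.contains (pvSplitSet line) p.1 then ' ' :: [p.2] else [p.2]))

-- remove_numers: "".join([i for i in line if i.isalpha()])
def pvRemoveNumbers (line : List Char) : List Char :=
  line.filter (fun c => PySem.Str.isalpha c)

def extract_governorate (text : String) : String :=
  let gov := (PySem.Chars.splitOn text.toList "School".toList).headD []  -- [0]; split never returns []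
  String.ofList (pvAddMissingSpaces (pvRemoveNumbers gov))

-- ===== PORT B =====
-- one loop iteration of Source B: keep alpha chars, space before an upper after a kept lower
def pvStep (st : List Char × Bool) (c : Char) : List Char × Bool :=
  if PySem.Str.isalpha c then
    ((if st.2 && PySem.Str.isupper c then st.1 ++ [' '] else st.1) ++ [c], PySem.Str.islower c)
  else st

def extract_governorate_alt (text : String) : String :=
  let gov := (PySem.Chars.splitOn text.toList "School".toList).headD []  -- [0]; split never returns []
  String.ofList (gov.foldl pvStep ([], false)).1

-- ===== PRECONDITION & SPEC =====
def Spec_extract_governorate (text : String) (out : String) : Prop := out = extract_governorate_alt text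
instance (text : String) (out : String) : Decidable (Spec_extract_governorate text out) := by unfold Spec_extract_governorate; infer_instance

-- ===== CLAIM (what is proved, stated in full; the proofs are below) =====
def Claim_equal_extract_governorate : Prop := ∀ (text : String), Dom_extract_governorate text → Spec_extract_governorate text (extract_governorate text)

-- ===== LEMMAS AND PROOFS =====

-- the common reference shape: emit the kept chars, spacing an upper char after a lower one
def pvEmit : Bool → List Char → List Char
  | _, [] => []
  | pl, c :: cs => (if pl && PySem.Str.isupper c then [' ', c] else [c]) ++ pvEmit (PySem.Str.islower c) cs

-- whether the last char of the processed prefix is lowercase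
def pvPrevLow (pre : List Char) : Bool :=
  match pre.getLast? with
  | some d => PySem.Str.islower d
  | none => false

theorem pvJoin_nil (l : List (List Char)) : PySem.Chars.join [] l = l.flatten := by
  induction l with
  | nil => rfl
  | cons x xs ih =>
      cases xs with
      | nil => simp [PySem.Chars.join, List.intercalate]
      | cons y ys =>
          simp only [PySem.Chars.join, List.intercalate] at ih ⊢
          simp [List.intersperse, ih]

-- B's fold emits pvEmit over the alpha-filtered remainder
theorem pvFoldl_step (cs : List Char) : ∀ (out : List Char) (pl : Bool),
    (cs.foldl pvStep (out, pl)).1 = out ++ pvEmit pl (cs.filter (fun c => PySem.Str.isalpha c)) := by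
  induction cs with
  | nil => intro out pl; simp [pvEmit]
  | cons c cs ih =>
      intro out pl
      by_cases h : PySem.Str.isalpha c = true
      · simp only [List.foldl_cons, pvStep, h, if_pos, List.filter_cons_of_pos h]
        rw [ih]
        cases hb : pl && PySem.Str.isupper c <;> simp [pvEmit, hb]
      · simp only [List.foldl_cons, pvStep, h]
        simp only [Bool.false_eq_true, if_false]
        rw [ih, List.filter_cons_of_neg (by simp [h])]

-- A's split-set membership at the boundary index is exactly the adjacency test
theorem pvMem_splitSet (pre : List Char) (c : Char) (suf : List Char) :
    (pre.length : Int) ∈ pvSplitSet (pre ++ c :: suf) ↔ (pvPrevLow pre && PySem.Str.isupper c) = true := by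
  rw [pvSplitSet, PySem.Set.mem_inter, PySem.Set.mem_ofList, PySem.Set.mem_ofList]
  simp only [List.mem_map, List.mem_filter, PySem.List.mem_enumerate_iff]
  constructor
  · rintro ⟨⟨a, ⟨⟨k, hk, rfl⟩, hl⟩, he⟩, ⟨b, ⟨⟨m, hm, rfl⟩, hu⟩, hf⟩⟩
    simp only [zero_add] at he hf hl hu
    have hk1 : k + 1 = pre.length := by exact_mod_cast he
    have hm1 : m = pre.length := by exact_mod_cast hf
    subst hm1
    have hcc : (pre ++ c :: suf)[pre.length] = c := by
      rw [List.getElem_append_right (le_refl _)]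
      simp
    rw [hcc] at hu
    have hkp : k < pre.length := by omega
    have hpk : (pre ++ c :: suf)[k] = pre[k]'hkp := List.getElem_append_left hkp
    rw [hpk] at hl
    have hlast : pvPrevLow pre = true := by
      unfold pvPrevLow
      have hg : pre.getLast? = some (pre[k]'hkp) := by
        rw [List.getLast?_eq_getElem?]
        have hke : pre.length - 1 = k := by omega
        rw [hke]
        simp
      rw [hg]
      simpa using hl
    simp [hlast, hu]
  · intro h
    have hu : PySem.Str.isupper c = true := by
      cases h' : PySem.Str.isupper c <;> simp [h'] at h ⊢
    have hl : pvPrevLow pre = true := by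
      cases h' : pvPrevLow pre <;> simp [h'] at h ⊢
    have hne : pre ≠ [] := by
      intro hn; rw [hn] at hl; simp [pvPrevLow] at hl
    have hpos : 0 < pre.length := List.length_pos_iff.mpr hne
    have hkp : pre.length - 1 < pre.length := by omega
    constructor
    · refine ⟨(0 + ((pre.length - 1 : Nat) : Int), (pre ++ c :: suf)[pre.length - 1]'(by simp; omega)),
        ⟨⟨pre.length - 1, by simp; omega, rfl⟩, ?_⟩, by push_cast; omega⟩
      have hpk : (pre ++ c :: suf)[pre.length - 1]'(by simp; omega) = pre[pre.length - 1]'hkp :=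
        List.getElem_append_left hkp
      simp only [hpk]
      unfold pvPrevLow at hl
      have hg : pre.getLast? = some (pre[pre.length - 1]'hkp) := by
        rw [List.getLast?_eq_getElem?]; simp
      rw [hg] at hl
      simpa using hl
    · refine ⟨(0 + (pre.length : Int), (pre ++ c :: suf)[pre.length]'(by simp)),
        ⟨⟨pre.length, by simp, rfl⟩, ?_⟩, by push_cast; ring⟩
      have hcc : (pre ++ c :: suf)[pre.length]'(by simp) = c := by
        rw [List.getElem_append_right (le_refl _)]
        simp
      simp only [hcc]
      exact hu

theorem pvSpace_at_append (pre : List Char) (c : Char) (suf : List Char) :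
    PySem.Set.contains (pvSplitSet (pre ++ c :: suf)) (pre.length : Int)
      = (pvPrevLow pre && PySem.Str.isupper c) := by
  cases hb : (pvPrevLow pre && PySem.Str.isupper c)
  · rw [Bool.eq_false_iff]
    intro hc
    have hmem := (PySem.Set.contains_iff _ _).mp hc
    rw [pvMem_splitSet] at hmem
    rw [hmem] at hb; exact Bool.true_eq_false.mp hb
  · exact (PySem.Set.contains_iff _ _).mpr ((pvMem_splitSet pre c suf).mpr hb)

-- the enumerate/set map computes pvEmit, one prefix at a time
theorem pvEmit_of_enumerate (suf : List Char) : ∀ (pre : List Char),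
    PySem.Chars.join [] ((PySem.List.enumerate suf (pre.length : Int)).map
      (fun p => if PySem.Set.contains (pvSplitSet (pre ++ suf)) p.1 then ' ' :: [p.2] else [p.2]))
      = pvEmit (pvPrevLow pre) suf := by
  induction suf with
  | nil => intro pre; simp [PySem.List.enumerate_nil, pvEmit]
  | cons c cs ih =>
      intro pre
      rw [PySem.List.enumerate_cons, List.map_cons, pvJoin_nil, List.flatten_cons, ← pvJoin_nil]
      have h1 : pre.length + (1 : Int) = ((pre ++ [c]).length : Int) := by simp
      have h2 : pre ++ c :: cs = (pre ++ [c]) ++ cs := by simp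
      rw [h2, h1, ih (pre ++ [c])]
      have h3 : pvPrevLow (pre ++ [c]) = PySem.Str.islower c := by
        simp [pvPrevLow]
      rw [h3, ← h2, pvSpace_at_append]
      cases hb : pvPrevLow pre && PySem.Str.isupper c <;> simp [pvEmit, hb]

theorem pvAddSpaces_eq (line : List Char) : pvAddMissingSpaces line = pvEmit false line := by
  have h := pvEmit_of_enumerate line []
  simpa [pvAddMissingSpaces, pvPrevLow] using h

theorem pvMain (gov : List Char) :
    String.ofList (pvAddMissingSpaces (pvRemoveNumbers gov)) = String.ofList (gov.foldl pvStep ([], false)).1 := by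
  rw [pvFoldl_step, pvAddSpaces_eq, pvRemoveNumbers]
  simp

-- ===== VERDICT (by name: the statement is the Claim_ definition above) =====
theorem extract_governorate_spec : Claim_equal_extract_governorate := by
  intro text _
  show extract_governorate text = extract_governorate_alt text
  unfold extract_governorate extract_governorate_alt
  exact pvMain _
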